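-- pv_equiv track=rewrite | github.com/dgwamna44/eXeMpLify-Music-Analyzer | analyzers/tempo_duration/tempo/helpers.py | _step_distance_from_range
-- ===== SOURCE A (Python) =====
-- VALID_TEMPOS = [
--     40, 42, 44, 46, 48, 50, 52, 54, 56, 58, 60,
--     63, 66, 69, 72, 76, 80, 84, 88, 92, 96,
--     100, 104, 108, 112, 116, 120, 126, 132, 138,
--     144, 152, 160, 168, 176, 184, 200, 208,
-- ]
--
-- def _step_distance_from_range(bpm: int, low: int, high: int) -> int:
--     if low <= bpm <= high:
--         return 0
--     if bpm < low:
--         below = [t for t in VALID_TEMPOS if t <= bpm]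
--         low_idx = VALID_TEMPOS.index(low) if low in VALID_TEMPOS else 0
--         bpm_idx = VALID_TEMPOS.index(below[-1]) if below else 0
--         return max(1, low_idx - bpm_idx)
--     above = [t for t in VALID_TEMPOS if t >= bpm]
--     high_idx = VALID_TEMPOS.index(high) if high in VALID_TEMPOS else len(VALID_TEMPOS) - 1
--     bpm_idx = VALID_TEMPOS.index(above[0]) if above else len(VALID_TEMPOS) - 1
--     return max(1, bpm_idx - high_idx)
-- ===== SOURCE B (Python) =====
-- VALID_TEMPOS = [
--     40, 42, 44, 46, 48, 50, 52, 54, 56, 58, 60,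
--     63, 66, 69, 72, 76, 80, 84, 88, 92, 96,
--     100, 104, 108, 112, 116, 120, 126, 132, 138,
--     144, 152, 160, 168, 176, 184, 200, 208,
-- ]
--
--
-- def _bisect_right(a, x):
--     lo, hi = 0, len(a)
--     while lo < hi:
--         mid = (lo + hi) // 2
--         if x < a[mid]:
--             hi = mid
--         else:
--             lo = mid + 1
--     return lo
--
--
-- def _bisect_left(a, x):
--     lo, hi = 0, len(a)
--     while lo < hi:
--         mid = (lo + hi) // 2
--         if a[mid] < x:
--             lo = mid + 1
--         else:
--             hi = mid
--     return lo
--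
--
-- def _step_distance_from_range(bpm: int, low: int, high: int) -> int:
--     if low <= bpm <= high:
--         return 0
--     n = len(VALID_TEMPOS)
--     if bpm < low:
--         r = _bisect_right(VALID_TEMPOS, bpm)
--         bpm_idx = r - 1 if r > 0 else 0
--         i = _bisect_left(VALID_TEMPOS, low)
--         low_idx = i if i < n and VALID_TEMPOS[i] == low else 0
--         return max(1, low_idx - bpm_idx)
--     l = _bisect_left(VALID_TEMPOS, bpm)
--     bpm_idx = l if l < n else n - 1
--     i = _bisect_left(VALID_TEMPOS, high)
--     high_idx = i if i < n and VALID_TEMPOS[i] == high else n - 1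
--     return max(1, bpm_idx - high_idx)
-- ===== Notes on version B (the rewrite author's own statement) =====
-- stated objective: alternative
-- what changed: Replaces A's filtered-list comprehensions and repeated linear list.index/membership scans with hand-written binary searches (bisect_left/bisect_right loops) into the sorted constant table, keeping the same fallback sentinels and max(1,...) clamp.
import Mathlib
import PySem

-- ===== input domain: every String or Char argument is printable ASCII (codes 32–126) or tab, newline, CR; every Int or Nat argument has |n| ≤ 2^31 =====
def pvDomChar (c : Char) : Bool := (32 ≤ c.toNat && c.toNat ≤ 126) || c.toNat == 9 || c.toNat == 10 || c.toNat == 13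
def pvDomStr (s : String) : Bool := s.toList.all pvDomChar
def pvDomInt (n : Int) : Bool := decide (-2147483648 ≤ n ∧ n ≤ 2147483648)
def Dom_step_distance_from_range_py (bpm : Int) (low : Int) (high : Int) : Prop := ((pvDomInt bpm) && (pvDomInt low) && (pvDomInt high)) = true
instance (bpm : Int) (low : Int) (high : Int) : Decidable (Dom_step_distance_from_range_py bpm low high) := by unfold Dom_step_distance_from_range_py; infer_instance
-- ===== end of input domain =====

-- B replaces A's filter-comprehensions and linear membership/index scans with hand-written
-- binary searches into the sorted constant table (alternative algorithm, same return value).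

-- ===== PORT A =====
def pvV : List Int :=
  [40, 42, 44, 46, 48, 50, 52, 54, 56, 58, 60,
   63, 66, 69, 72, 76, 80, 84, 88, 92, 96,
   100, 104, 108, 112, 116, 120, 126, 132, 138,
   144, 152, 160, 168, 176, 184, 200, 208]

def step_distance_from_range_py (bpm : Int) (low : Int) (high : Int) : Int :=
  if low ≤ bpm ∧ bpm ≤ high then 0
  else if bpm < low then
    let below := pvV.filter (fun t => decide (t ≤ bpm))
    let low_idx : Int := if low ∈ pvV then (((PySem.List.index? pvV low).getD 0 : Nat) : Int) else 0
    let bpm_idx : Int :=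
      if below ≠ [] then (((PySem.List.index? pvV (PySem.List.pyGetD below (-1) 0)).getD 0 : Nat) : Int) else 0
    max 1 (low_idx - bpm_idx)
  else
    let above := pvV.filter (fun t => decide (bpm ≤ t))
    let high_idx : Int :=
      if high ∈ pvV then (((PySem.List.index? pvV high).getD 0 : Nat) : Int) else (pvV.length : Int) - 1
    let bpm_idx : Int :=
      if above ≠ [] then (((PySem.List.index? pvV (PySem.List.pyGetD above 0 0)).getD 0 : Nat) : Int)
      else (pvV.length : Int) - 1
    max 1 (bpm_idx - high_idx)

-- ===== PORT B =====
-- hand-written bisect_right while-loop of Source B, as tail recursion on (lo, hi)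
def pvBR (a : List Int) (x : Int) (lo hi : Nat) : Nat :=
  if h : lo < hi then
    if x < a.getD ((lo + hi) / 2) 0 then pvBR a x lo ((lo + hi) / 2)
    else pvBR a x ((lo + hi) / 2 + 1) hi
  else lo
termination_by hi - lo
decreasing_by all_goals omega

-- hand-written bisect_left while-loop of Source B
def pvBL (a : List Int) (x : Int) (lo hi : Nat) : Nat :=
  if h : lo < hi then
    if a.getD ((lo + hi) / 2) 0 < x then pvBL a x ((lo + hi) / 2 + 1) hi
    else pvBL a x lo ((lo + hi) / 2)
  else lo
termination_by hi - lo
decreasing_by all_goals omega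

def step_distance_from_range_py_alt (bpm : Int) (low : Int) (high : Int) : Int :=
  if low ≤ bpm ∧ bpm ≤ high then 0
  else
    let n := pvV.length
    if bpm < low then
      let r := pvBR pvV bpm 0 n
      let bpm_idx : Int := if 0 < r then (r : Int) - 1 else 0
      let i := pvBL pvV low 0 n
      let low_idx : Int := if i < n ∧ pvV.getD i 0 == low then (i : Int) else 0
      max 1 (low_idx - bpm_idx)
    else
      let l := pvBL pvV bpm 0 n
      let bpm_idx : Int := if l < n then (l : Int) else (n : Int) - 1
      let i := pvBL pvV high 0 n
      let high_idx : Int := if i < n ∧ pvV.getD i 0 == high then (i : Int) else (n : Int) - 1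
      max 1 (bpm_idx - high_idx)

-- ===== PRECONDITION & SPEC =====
def Spec_step_distance_from_range_py (bpm : Int) (low : Int) (high : Int) (out : Int) : Prop := out = step_distance_from_range_py_alt bpm low high
instance (bpm : Int) (low : Int) (high : Int) (out : Int) : Decidable (Spec_step_distance_from_range_py bpm low high out) := by unfold Spec_step_distance_from_range_py; infer_instance

-- ===== CLAIM (what is proved, stated in full; the proofs are below) =====
def Claim_equal_step_distance_from_range_py : Prop := ∀ (bpm : Int) (low : Int) (high : Int), Dom_step_distance_from_range_py bpm low high → Spec_step_distance_from_range_py bpm low high (step_distance_from_range_py bpm low high)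

-- ===== LEMMAS AND PROOFS =====

-- invariant of the bisect_right loop on pvV
lemma pvBR_inv (x : Int) : ∀ (k lo hi : Nat), hi - lo ≤ k → lo ≤ hi → hi ≤ pvV.length →
    lo ≤ pvBR pvV x lo hi ∧ pvBR pvV x lo hi ≤ hi ∧
    (lo < pvBR pvV x lo hi → pvV.getD (pvBR pvV x lo hi - 1) 0 ≤ x) ∧
    (pvBR pvV x lo hi < hi → x < pvV.getD (pvBR pvV x lo hi) 0) := by
  intro k
  induction k with
  | zero =>
    intro lo hi hk hle _
    rw [pvBR]
    have : ¬ lo < hi := by omega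
    simp [this]; omega
  | succ k ih =>
    intro lo hi hk hle hhi
    rw [pvBR]
    by_cases h : lo < hi
    · simp only [h, dif_pos]
      by_cases hc : x < pvV.getD ((lo + hi) / 2) 0
      · simp only [hc, if_pos]
        have := ih lo ((lo + hi) / 2) (by omega) (by omega) (by omega)
        refine ⟨this.1, by omega, this.2.2.1, ?_⟩
        intro hr
        rcases Nat.lt_or_ge (pvBR pvV x lo ((lo + hi) / 2)) ((lo + hi) / 2) with h' | h'
        · exact this.2.2.2 h'
        · have he : pvBR pvV x lo ((lo + hi) / 2) = (lo + hi) / 2 := by omega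
          rw [he]; exact hc
      · simp only [hc, if_false]
        have := ih ((lo + hi) / 2 + 1) hi (by omega) (by omega) hhi
        refine ⟨by omega, this.2.1, ?_, this.2.2.2⟩
        intro hr
        rcases Nat.lt_or_ge ((lo + hi) / 2 + 1) (pvBR pvV x ((lo + hi) / 2 + 1) hi) with h' | h'
        · exact this.2.2.1 h'
        · have he : pvBR pvV x ((lo + hi) / 2 + 1) hi = (lo + hi) / 2 + 1 := by omega
          rw [he]; simpa using not_lt.mp hc
    · simp [h]; omega

-- invariant of the bisect_left loop on pvV
lemma pvBL_inv (x : Int) : ∀ (k lo hi : Nat), hi - lo ≤ k → lo ≤ hi → hi ≤ pvV.length →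
    lo ≤ pvBL pvV x lo hi ∧ pvBL pvV x lo hi ≤ hi ∧
    (lo < pvBL pvV x lo hi → pvV.getD (pvBL pvV x lo hi - 1) 0 < x) ∧
    (pvBL pvV x lo hi < hi → x ≤ pvV.getD (pvBL pvV x lo hi) 0) := by
  intro k
  induction k with
  | zero =>
    intro lo hi hk hle _
    rw [pvBL]
    have : ¬ lo < hi := by omega
    simp [this]; omega
  | succ k ih =>
    intro lo hi hk hle hhi
    rw [pvBL]
    by_cases h : lo < hi
    · simp only [h, dif_pos]
      by_cases hc : pvV.getD ((lo + hi) / 2) 0 < x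
      · simp only [hc, if_pos]
        have := ih ((lo + hi) / 2 + 1) hi (by omega) (by omega) hhi
        refine ⟨by omega, this.2.1, ?_, this.2.2.2⟩
        intro hr
        rcases Nat.lt_or_ge ((lo + hi) / 2 + 1) (pvBL pvV x ((lo + hi) / 2 + 1) hi) with h' | h'
        · exact this.2.2.1 h'
        · have he : pvBL pvV x ((lo + hi) / 2 + 1) hi = (lo + hi) / 2 + 1 := by omega
          rw [he]; exact hc
      · simp only [hc, if_false]
        have := ih lo ((lo + hi) / 2) (by omega) (by omega) (by omega)
        refine ⟨this.1, by omega, this.2.2.1, ?_⟩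
        intro hr
        rcases Nat.lt_or_ge (pvBL pvV x lo ((lo + hi) / 2)) ((lo + hi) / 2) with h' | h'
        · exact this.2.2.2 h'
        · have he : pvBL pvV x lo ((lo + hi) / 2) = (lo + hi) / 2 := by omega
          rw [he]; simpa using not_lt.mp hc
    · simp [h]; omega

-- pvV is (weakly) monotone in its indices; finite, so decidable
lemma pvV_mono : ∀ i, i < 38 → ∀ j, j < 38 → i ≤ j → pvV.getD i 0 ≤ pvV.getD j 0 := by decide

lemma pvV_len : pvV.length = 38 := by decide

-- getD agrees with getElem in range
lemma pvV_getD_eq (j : Nat) (hj : j < 38) : pvV.getD j 0 = pvV[j]'(by rw [pvV_len]; exact hj) := by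
  rw [List.getD_eq_getElem?_getD, List.getElem?_eq_getElem (by rw [pvV_len]; exact hj)]
  rfl

-- a prefix-true predicate filters to a take
lemma filter_eq_take {α} (p : α → Bool) : ∀ (xs : List α) (r : Nat), r ≤ xs.length →
    (∀ j (hj : j < xs.length), p xs[j] = decide (j < r)) → xs.filter p = xs.take r := by
  intro xs
  induction xs with
  | nil => intro r _ _; simp
  | cons a xs ih =>
    intro r hr hchar
    cases r with
    | zero =>
      have h0 : p a = false := by simpa using hchar 0 (by simp)
      have htl : xs.filter p = xs.take 0 := by
        refine ih 0 (by omega) ?_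
        intro j hj
        simpa using hchar (j + 1) (by simpa using Nat.succ_lt_succ hj)
      simpa [List.filter, h0] using htl
    | succ s =>
      have h0 : p a = true := by simpa using hchar 0 (by simp)
      have htl : xs.filter p = xs.take s := by
        refine ih s (by simpa using hr) ?_
        intro j hj
        have := hchar (j + 1) (by simpa using Nat.succ_lt_succ hj)
        simpa [Nat.succ_lt_succ_iff] using this
      simp [List.filter, h0, htl]

-- a suffix-true predicate filters to a drop
lemma filter_eq_drop {α} (p : α → Bool) : ∀ (xs : List α) (l : Nat), l ≤ xs.length →
    (∀ j (hj : j < xs.length), p xs[j] = decide (l ≤ j)) → xs.filter p = xs.drop l := by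
  intro xs
  induction xs with
  | nil => intro l _ _; simp
  | cons a xs ih =>
    intro l hl hchar
    cases l with
    | zero =>
      have hall : ∀ x ∈ a :: xs, p x = true := by
        intro x hx
        obtain ⟨j, hj, rfl⟩ := List.getElem_of_mem hx
        simpa using hchar j hj
      simpa using List.filter_eq_self.mpr hall
    | succ s =>
      have h0 : p a = false := by simpa using hchar 0 (by simp)
      have htl : xs.filter p = xs.drop s := by
        refine ih s (by simpa using hl) ?_
        intro j hj
        have := hchar (j + 1) (by simpa using Nat.succ_lt_succ hj)
        simpa [Nat.succ_le_succ_iff] using this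
      simp [List.filter, h0, htl]

-- characterisation: the bisect_right result splits pvV at "≤ bpm"
lemma pvBR_char (bpm : Int) (j : Nat) (hj : j < pvV.length) :
    (decide (pvV[j] ≤ bpm)) = decide (j < pvBR pvV bpm 0 pvV.length) := by
  have hlen : pvV.length = 38 := pvV_len
  have hinv := pvBR_inv bpm pvV.length 0 pvV.length (by omega) (by omega) (le_refl _)
  set r := pvBR pvV bpm 0 pvV.length with hr
  obtain ⟨-, hb, h2, h3⟩ := hinv
  by_cases h : j < r
  · have hm : pvV.getD j 0 ≤ pvV.getD (r - 1) 0 := pvV_mono j (by omega) (r - 1) (by omega) (by omega)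
    have hx : pvV.getD (r - 1) 0 ≤ bpm := h2 (by omega)
    have hg : pvV[j] ≤ bpm := by rw [← pvV_getD_eq j (by omega)]; omega
    simp [h, hg]
  · have hx : bpm < pvV.getD r 0 := h3 (by omega)
    have hm : pvV.getD r 0 ≤ pvV.getD j 0 := pvV_mono r (by omega) j (by omega) (by omega)
    have hg : ¬ pvV[j] ≤ bpm := by rw [← pvV_getD_eq j (by omega)]; omega
    simp [h, hg]

-- characterisation: the bisect_left result splits pvV at "≥ bpm"
lemma pvBL_char (bpm : Int) (j : Nat) (hj : j < pvV.length) :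
    (decide (bpm ≤ pvV[j])) = decide (pvBL pvV bpm 0 pvV.length ≤ j) := by
  have hlen : pvV.length = 38 := pvV_len
  have hinv := pvBL_inv bpm pvV.length 0 pvV.length (by omega) (by omega) (le_refl _)
  set l := pvBL pvV bpm 0 pvV.length with hl
  obtain ⟨-, hb, h2, h3⟩ := hinv
  by_cases h : l ≤ j
  · have hx : bpm ≤ pvV.getD l 0 := h3 (by omega)
    have hm : pvV.getD l 0 ≤ pvV.getD j 0 := pvV_mono l (by omega) j (by omega) (by omega)
    have hg : bpm ≤ pvV[j] := by rw [← pvV_getD_eq j (by omega)]; omega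
    simp [h, hg]
  · have hx : pvV.getD (l - 1) 0 < bpm := h2 (by omega)
    have hm : pvV.getD j 0 ≤ pvV.getD (l - 1) 0 := pvV_mono j (by omega) (l - 1) (by omega) (by omega)
    have hg : ¬ bpm ≤ pvV[j] := by rw [← pvV_getD_eq j (by omega)]; omega
    simp [h, hg]

-- the two "index of last tempo ≤ bpm" computations agree
lemma bpm_below_eq (bpm : Int) :
    (if pvV.filter (fun t => decide (t ≤ bpm)) ≠ [] then
        (((PySem.List.index? pvV (PySem.List.pyGetD (pvV.filter (fun t => decide (t ≤ bpm))) (-1) 0)).getD 0 : Nat) : Int)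
      else 0)
    = (if 0 < pvBR pvV bpm 0 pvV.length then ((pvBR pvV bpm 0 pvV.length : Nat) : Int) - 1 else 0) := by
  have hlen : pvV.length = 38 := pvV_len
  have hinv := pvBR_inv bpm pvV.length 0 pvV.length (by omega) (by omega) (le_refl _)
  have hfilter : pvV.filter (fun t => decide (t ≤ bpm)) = pvV.take (pvBR pvV bpm 0 pvV.length) :=
    filter_eq_take _ pvV _ hinv.2.1 (fun j hj => pvBR_char bpm j hj)
  rw [hfilter]
  set r := pvBR pvV bpm 0 pvV.length with hr
  clear_value r
  have hle : r ≤ 38 := by have := hinv.2.1; omega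
  clear hinv hfilter hr
  interval_cases r <;> decide

-- the two "index of first tempo ≥ bpm" computations agree
lemma bpm_above_eq (bpm : Int) :
    (if pvV.filter (fun t => decide (bpm ≤ t)) ≠ [] then
        (((PySem.List.index? pvV (PySem.List.pyGetD (pvV.filter (fun t => decide (bpm ≤ t))) 0 0)).getD 0 : Nat) : Int)
      else (pvV.length : Int) - 1)
    = (if pvBL pvV bpm 0 pvV.length < pvV.length then ((pvBL pvV bpm 0 pvV.length : Nat) : Int)
       else (pvV.length : Int) - 1) := by
  have hlen : pvV.length = 38 := pvV_len
  have hinv := pvBL_inv bpm pvV.length 0 pvV.length (by omega) (by omega) (le_refl _)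
  have hfilter : pvV.filter (fun t => decide (bpm ≤ t)) = pvV.drop (pvBL pvV bpm 0 pvV.length) :=
    filter_eq_drop _ pvV _ hinv.2.1 (fun j hj => pvBL_char bpm j hj)
  rw [hfilter]
  set l := pvBL pvV bpm 0 pvV.length with hl
  clear_value l
  have hle : l ≤ 38 := by have := hinv.2.1; omega
  clear hinv hfilter hl
  interval_cases l <;> decide

-- proof-side structural (fuelled) twin of pvBL, so that the kernel can evaluate it
def pvBLF (x : Int) : Nat → Nat → Nat → Nat
  | 0, lo, _ => lo
  | k + 1, lo, hi =>
    if lo < hi then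
      if pvV.getD ((lo + hi) / 2) 0 < x then pvBLF x k ((lo + hi) / 2 + 1) hi
      else pvBLF x k lo ((lo + hi) / 2)
    else lo

lemma pvBL_eq_fuel (x : Int) : ∀ (k lo hi : Nat), hi - lo ≤ k → pvBL pvV x lo hi = pvBLF x k lo hi := by
  intro k
  induction k with
  | zero =>
    intro lo hi h
    rw [pvBL]
    have : ¬ lo < hi := by omega
    simp [pvBLF, this]
  | succ k ih =>
    intro lo hi h
    rw [pvBL, pvBLF]
    split_ifs with h1 h2
    · exact ih _ _ (by omega)
    · exact ih _ _ (by omega)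
    · rfl

-- membership lookup with fallback d: linear index? vs bisect_left probe
lemma mem_idx_eq (v : Int) (d : Int) :
    (if v ∈ pvV then (((PySem.List.index? pvV v).getD 0 : Nat) : Int) else d)
    = (if pvBL pvV v 0 pvV.length < pvV.length ∧ pvV.getD (pvBL pvV v 0 pvV.length) 0 == v
       then ((pvBL pvV v 0 pvV.length : Nat) : Int) else d) := by
  have hf : pvBL pvV v 0 pvV.length = pvBLF v 38 0 38 := by
    rw [pvV_len]; exact pvBL_eq_fuel v 38 0 38 (by omega)
  rw [hf]
  by_cases hm : v ∈ pvV
  · fin_cases hm <;>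
      · rw [if_pos (by decide), if_pos (by rw [pvV_len]; decide)]
        decide
  · rw [if_neg hm, if_neg]
    rintro ⟨h1, h2⟩
    apply hm
    have hg := List.getD_eq_getElem pvV 0 h1
    rw [hg] at h2
    exact (beq_iff_eq.mp h2) ▸ List.getElem_mem h1

-- ===== VERDICT (by name: the statement is the Claim_ definition above) =====
theorem step_distance_from_range_py_spec : Claim_equal_step_distance_from_range_py := by
  intro bpm low high _
  unfold Spec_step_distance_from_range_py
  unfold step_distance_from_range_py step_distance_from_range_py_alt
  by_cases h1 : low ≤ bpm ∧ bpm ≤ high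
  · rw [if_pos h1, if_pos h1]
  · rw [if_neg h1, if_neg h1]
    by_cases h2 : bpm < low
    · rw [if_pos h2, if_pos h2]
      dsimp only
      rw [← mem_idx_eq low 0, ← bpm_below_eq bpm]
    · rw [if_neg h2, if_neg h2]
      dsimp only
      rw [← mem_idx_eq high ((pvV.length : Int) - 1), ← bpm_above_eq bpm]
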